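-- pv_equiv track=rewrite | github.com/aaronzhfeng/RRMC | rrmc/methods/dqs.py | _match_suspect
-- ===== SOURCE A (Python) =====
-- from typing import List, Dict, Optional, Any, Tuple
--
-- def _match_suspect(name: str, suspect_names: List[str]) -> str:
--     name_lower = name.strip().lower()
--     for sn in suspect_names:
--         if sn.lower() == name_lower:
--             return sn
--     for sn in suspect_names:
--         if sn.lower() in name_lower or name_lower in sn.lower():
--             return sn
--     return suspect_names[0] if suspect_names else name
-- ===== SOURCE B (Python) =====
-- from typing import List
--
-- def _match_suspect(name: str, suspect_names: List[str]) -> str: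
--     name_lower = name.strip().lower()
--     first_substring = None
--     for sn in suspect_names:
--         sn_lower = sn.lower()
--         if sn_lower == name_lower:
--             return sn
--         if first_substring is None and (sn_lower in name_lower or name_lower in sn_lower):
--             first_substring = sn
--     if first_substring is not None:
--         return first_substring
--     return suspect_names[0] if suspect_names else name
-- ===== Notes on version B (the rewrite author's own statement) =====
-- stated objective: alternative
-- what changed: Replaced A's two sequential scans (exact-match scan, then substring scan) by one stateful pass that returns immediately on an exact match and remembers only the first substring match for the fallback.
import Mathlib
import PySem

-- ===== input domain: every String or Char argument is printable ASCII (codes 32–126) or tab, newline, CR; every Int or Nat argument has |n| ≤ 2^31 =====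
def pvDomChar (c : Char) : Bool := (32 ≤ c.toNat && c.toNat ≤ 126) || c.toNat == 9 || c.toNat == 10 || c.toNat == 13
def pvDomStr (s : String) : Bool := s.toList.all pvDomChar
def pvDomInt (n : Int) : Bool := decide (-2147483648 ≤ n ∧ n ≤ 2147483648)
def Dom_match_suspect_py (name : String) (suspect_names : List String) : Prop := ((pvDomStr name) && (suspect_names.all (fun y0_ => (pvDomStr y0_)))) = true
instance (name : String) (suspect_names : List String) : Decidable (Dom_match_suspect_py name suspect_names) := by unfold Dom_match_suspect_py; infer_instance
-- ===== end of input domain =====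

-- B replaces A's two sequential scans by one stateful pass remembering the first substring match (alternative decomposition; same cost).

-- ===== PORT A =====
-- A's substring test for the second loop: sn.lower() in name_lower or name_lower in sn.lower()
def pvSubCond (nl : String) (sn : String) : Bool :=
  PySem.Str.isIn (PySem.Str.lower sn) nl || PySem.Str.isIn nl (PySem.Str.lower sn)

def match_suspect_py (name : String) (suspect_names : List String) : String :=
  let nl := PySem.Str.lower (PySem.Str.strip name)
  match suspect_names.find? (fun sn => PySem.Str.lower sn == nl) with
  | some sn => sn
  | none =>
    match suspect_names.find? (fun sn => pvSubCond nl sn) with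
    | some sn => sn
    | none => match suspect_names with
              | [] => name
              | x :: _ => x

-- ===== PORT B =====
-- single pass: return on exact match; remember first substring match in `first`
def pvAltLoop (nl : String) (first : Option String) : List String → Option String
  | [] => first
  | sn :: rest =>
    if PySem.Str.lower sn == nl then some sn
    else if first.isNone && pvSubCond nl sn then pvAltLoop nl (some sn) rest
    else pvAltLoop nl first rest

def match_suspect_py_alt (name : String) (suspect_names : List String) : String :=
  let nl := PySem.Str.lower (PySem.Str.strip name)
  match pvAltLoop nl none suspect_names with
  | some sn => sn
  | none => match suspect_names with
            | [] => name
            | x :: _ => x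

-- ===== PRECONDITION & SPEC =====
def Spec_match_suspect_py (name : String) (suspect_names : List String) (out : String) : Prop := out = match_suspect_py_alt name suspect_names
instance (name : String) (suspect_names : List String) (out : String) : Decidable (Spec_match_suspect_py name suspect_names out) := by unfold Spec_match_suspect_py; infer_instance

-- ===== CLAIM (what is proved, stated in full; the proofs are below) =====
def Claim_equal_match_suspect_py : Prop := ∀ (name : String) (suspect_names : List String), Dom_match_suspect_py name suspect_names → Spec_match_suspect_py name suspect_names (match_suspect_py name suspect_names)

-- ===== LEMMAS AND PROOFS =====

-- characterisation of B's single pass in terms of A's two scans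
theorem pvAltLoop_eq (nl : String) (l : List String) (first : Option String) :
    pvAltLoop nl first l =
      match l.find? (fun sn => PySem.Str.lower sn == nl) with
      | some sn => some sn
      | none =>
        match first with
        | some c => some c
        | none => l.find? (fun sn => pvSubCond nl sn) := by
  induction l generalizing first with
  | nil => cases first <;> simp [pvAltLoop]
  | cons sn rest ih =>
    by_cases hx : (PySem.Str.lower sn == nl) = true
    · simp [pvAltLoop, hx, List.find?]
    · simp only [Bool.not_eq_true] at hx
      by_cases hs : pvSubCond nl sn = true
      · cases first with
        | none =>
          simp [pvAltLoop, hx, hs, List.find?, ih]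
        | some c =>
          simp [pvAltLoop, hx, hs, List.find?, ih]
      · simp only [Bool.not_eq_true] at hs
        cases first <;> simp [pvAltLoop, hx, hs, List.find?, ih]

-- ===== VERDICT (by name: the statement is the Claim_ definition above) =====
theorem match_suspect_py_spec : Claim_equal_match_suspect_py := by
  intro name suspect_names _
  unfold Spec_match_suspect_py match_suspect_py match_suspect_py_alt
  simp only []
  rw [pvAltLoop_eq]
  rcases h1 : suspect_names.find? (fun sn => PySem.Str.lower sn == (PySem.Str.lower (PySem.Str.strip name))) with _ | sn
  · rcases h2 : suspect_names.find? (fun sn => pvSubCond (PySem.Str.lower (PySem.Str.strip name)) sn) with _ | sn <;> simp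
  · simp
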